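-- pv_equiv track=rewrite | github.com/scxr/foobar-sols.py | 3c.py | solution
-- ===== SOURCE A (Python) =====
-- def solution(tripletlist):
--     newarr = [0] * len(tripletlist) # create an empty array the size of tl
--     cnt = 0 # init our output
--     for i in range(0,len(tripletlist)):
--         for j in range(0, i):
--             if tripletlist[i] % tripletlist[j] == 0: # if theyre divisible
--                 newarr[i] += 1 # add to our new array
--                 cnt += newarr[j] # completed
--     return cnt # answer
-- ===== SOURCE B (Python) =====
-- def solution(tripletlist):
--     # Pivot on the middle element: for each j, count left divisors and right multiples.
--     n = len(tripletlist)
--     total = 0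
--     for j in range(n):
--         left = 0
--         for i in range(j):
--             if tripletlist[j] % tripletlist[i] == 0:
--                 left += 1
--         right = 0
--         for k in range(j + 1, n):
--             if tripletlist[k] % tripletlist[j] == 0:
--                 right += 1
--         total += left * right
--     return total
-- ===== Notes on version B (the rewrite author's own statement) =====
-- stated objective: alternative
-- what changed: B pivots on the middle element of each chain, computing for every index j the count of left divisors and right multiples and summing their products, instead of A's single pass that threads a mutable pair-count array and accumulates completed triples on the fly.
import Mathlib
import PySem

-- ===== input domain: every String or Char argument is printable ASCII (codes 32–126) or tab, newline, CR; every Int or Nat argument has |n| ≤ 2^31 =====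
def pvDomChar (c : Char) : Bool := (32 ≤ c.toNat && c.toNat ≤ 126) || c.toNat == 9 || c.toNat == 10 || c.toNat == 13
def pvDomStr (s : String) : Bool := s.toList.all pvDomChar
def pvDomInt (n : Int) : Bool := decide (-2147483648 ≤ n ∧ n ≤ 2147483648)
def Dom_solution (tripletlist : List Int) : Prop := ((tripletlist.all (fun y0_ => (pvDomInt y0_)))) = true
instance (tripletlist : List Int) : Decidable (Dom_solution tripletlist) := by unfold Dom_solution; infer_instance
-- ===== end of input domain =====

-- B counts, for each middle index j, left divisors times right multiples; A threads a
-- mutable pair-count array. Same O(n^2) cost, different decomposition (objective: alternative).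

-- ===== PORT A =====
-- All list indices produced by `range` are nonnegative and in range, so `getD _ 0`
-- is exact for Python's indexing here; `%` is PySem.Int.mod (divisor nonzero under Pre_).
def solution (tripletlist : List Int) : Int :=
  ((List.range tripletlist.length).foldl (fun st i =>
      (List.range i).foldl (fun st j =>
        if PySem.Int.mod (tripletlist.getD i 0) (tripletlist.getD j 0) = 0 then
          ((st.1.set i (st.1.getD i 0 + 1)),
           st.2 + (st.1.set i (st.1.getD i 0 + 1)).getD j 0)
        else st) st)
    (List.replicate tripletlist.length (0 : Int), (0 : Int))).2

-- ===== PORT B =====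
def solution_alt (tripletlist : List Int) : Int :=
  let n := tripletlist.length
  (List.range n).foldl (fun total j =>
    let left := (List.range j).foldl (fun c i =>
      if PySem.Int.mod (tripletlist.getD j 0) (tripletlist.getD i 0) = 0 then c + 1 else c) 0
    let right := (List.range' (j + 1) (n - (j + 1))).foldl (fun c k =>
      if PySem.Int.mod (tripletlist.getD k 0) (tripletlist.getD j 0) = 0 then c + 1 else c) 0
    total + left * right) 0

-- ===== PRECONDITION & SPEC =====
-- Pre_ excludes exactly the inputs where Python A raises ZeroDivisionError: a zero anywhere
-- except the last position is used as a divisor (B raises there too).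
def Pre_solution (tripletlist : List Int) : Prop := ∀ x ∈ tripletlist.dropLast, x ≠ (0 : Int)
instance (tripletlist : List Int) : Decidable (Pre_solution tripletlist) := by unfold Pre_solution; infer_instance
def pvWitness_solution : List Int := ([1, 2, 4])

def Spec_solution (tripletlist : List Int) (out : Int) : Prop := out = solution_alt tripletlist
instance (tripletlist : List Int) (out : Int) : Decidable (Spec_solution tripletlist out) := by unfold Spec_solution; infer_instance

-- ===== CLAIM (what is proved, stated in full; the proofs are below) =====
def Claim_equal_solution : Prop := ∀ (tripletlist : List Int), Dom_solution tripletlist → Pre_solution tripletlist → Spec_solution tripletlist (solution tripletlist)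

-- ===== LEMMAS AND PROOFS =====

-- indicator: tl[i] % tl[j] == 0 (tl[j] divides tl[i])
def eP (tl : List Int) (j i : Nat) : Int :=
  if PySem.Int.mod (tl.getD i 0) (tl.getD j 0) = 0 then 1 else 0

-- left-divisor count at j and right-multiple count at j
def Lc (tl : List Int) (j : Nat) : Int := ∑ i ∈ Finset.range j, eP tl i j
def Rc (tl : List Int) (j : Nat) : Int := ∑ k ∈ Finset.Ico (j + 1) tl.length, eP tl j k

theorem getD_set_ne (l : List Int) (i j : Nat) (x : Int) (h : i ≠ j) :
    (l.set i x).getD j 0 = l.getD j 0 := by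
  simp [List.getD_eq_getElem?_getD, List.getElem?_set_ne h]

theorem getD_set_self (l : List Int) (i : Nat) (x : Int) (h : i < l.length) :
    (l.set i x).getD i 0 = x := by
  simp [List.getD_eq_getElem?_getD, h]

theorem innerA_spec (tl arr : List Int) (cnt : Int) (i : Nat)
    (hi : i < tl.length) (hlen : arr.length = tl.length) : ∀ m, m ≤ i →
    ((List.range m).foldl (fun st j =>
        if PySem.Int.mod (tl.getD i 0) (tl.getD j 0) = 0 then
          ((st.1.set i (st.1.getD i 0 + 1)),
           st.2 + (st.1.set i (st.1.getD i 0 + 1)).getD j 0)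
        else st) (arr, cnt)).2
      = cnt + ∑ j ∈ Finset.range m, eP tl j i * arr.getD j 0
    ∧ ((List.range m).foldl (fun st j =>
        if PySem.Int.mod (tl.getD i 0) (tl.getD j 0) = 0 then
          ((st.1.set i (st.1.getD i 0 + 1)),
           st.2 + (st.1.set i (st.1.getD i 0 + 1)).getD j 0)
        else st) (arr, cnt)).1.length = arr.length
    ∧ ∀ m', ((List.range m).foldl (fun st j =>
        if PySem.Int.mod (tl.getD i 0) (tl.getD j 0) = 0 then
          ((st.1.set i (st.1.getD i 0 + 1)),
           st.2 + (st.1.set i (st.1.getD i 0 + 1)).getD j 0)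
        else st) (arr, cnt)).1.getD m' 0
      = if m' = i then arr.getD i 0 + ∑ j ∈ Finset.range m, eP tl j i else arr.getD m' 0 := by
  intro m
  induction m with
  | zero =>
      intro _
      refine ⟨by simp, by simp, ?_⟩
      intro m'
      split_ifs with h <;> simp [h]
  | succ m ih =>
      intro hm
      obtain ⟨ih1, ih2, ih3⟩ := ih (by omega)
      have hmi : m ≠ i := by omega
      simp only [List.range_succ, List.foldl_append, List.foldl_cons, List.foldl_nil]
      have hePm : eP tl m i = if PySem.Int.mod (tl.getD i 0) (tl.getD m 0) = 0 then 1 else 0 := rfl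
      split_ifs with hc
      · refine ⟨?_, ?_, ?_⟩
        · rw [getD_set_ne _ _ _ _ (fun h => hmi h.symm), ih1, ih3 m, if_neg hmi,
            Finset.sum_range_succ, hePm, if_pos hc]
          ring
        · rw [List.length_set, ih2]
        · intro m'
          by_cases hm' : m' = i
          · rw [hm', getD_set_self _ _ _ (by rw [ih2, hlen]; exact hi), ih3 i, if_pos rfl,
              if_pos rfl, Finset.sum_range_succ, hePm, if_pos hc]
            ring
          · rw [getD_set_ne _ _ _ _ (fun h => hm' h.symm), ih3 m']
            simp [hm']
      · refine ⟨?_, ih2, ?_⟩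
        · rw [ih1, Finset.sum_range_succ, hePm, if_neg hc]
          ring
        · intro m'
          rw [ih3 m']
          split_ifs with h
          · rw [Finset.sum_range_succ, hePm, if_neg hc]; ring
          · rfl

theorem outerA_spec (tl : List Int) : ∀ i, i ≤ tl.length →
    ((List.range i).foldl (fun st i =>
      (List.range i).foldl (fun st j =>
        if PySem.Int.mod (tl.getD i 0) (tl.getD j 0) = 0 then
          ((st.1.set i (st.1.getD i 0 + 1)),
           st.2 + (st.1.set i (st.1.getD i 0 + 1)).getD j 0)
        else st) st)
      (List.replicate tl.length (0 : Int), (0 : Int))).2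
      = ∑ i' ∈ Finset.range i, ∑ j ∈ Finset.range i', eP tl j i' * Lc tl j
    ∧ ((List.range i).foldl (fun st i =>
      (List.range i).foldl (fun st j =>
        if PySem.Int.mod (tl.getD i 0) (tl.getD j 0) = 0 then
          ((st.1.set i (st.1.getD i 0 + 1)),
           st.2 + (st.1.set i (st.1.getD i 0 + 1)).getD j 0)
        else st) st)
      (List.replicate tl.length (0 : Int), (0 : Int))).1.length = tl.length
    ∧ ∀ m, ((List.range i).foldl (fun st i =>
      (List.range i).foldl (fun st j =>
        if PySem.Int.mod (tl.getD i 0) (tl.getD j 0) = 0 then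
          ((st.1.set i (st.1.getD i 0 + 1)),
           st.2 + (st.1.set i (st.1.getD i 0 + 1)).getD j 0)
        else st) st)
      (List.replicate tl.length (0 : Int), (0 : Int))).1.getD m 0
      = if m < i then Lc tl m else 0 := by
  intro i
  induction i with
  | zero =>
      intro _
      refine ⟨by simp, by simp, ?_⟩
      intro m
      simp [List.getD_eq_getElem?_getD, List.getElem?_replicate]
      split_ifs <;> rfl
  | succ i ih =>
      intro hi
      obtain ⟨ih1, ih2, ih3⟩ := ih (by omega)
      simp only [List.range_succ, List.foldl_append, List.foldl_cons, List.foldl_nil]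
      obtain ⟨s1, s2, s3⟩ := innerA_spec tl _ _ i (by omega) ih2 i le_rfl
      refine ⟨?_, by rw [s2, ih2], ?_⟩
      · rw [s1, ih1, Finset.sum_range_succ]
        congr 1
        refine Finset.sum_congr rfl ?_
        intro j hj
        rw [ih3 j, if_pos (Finset.mem_range.mp hj)]
      · intro m
        by_cases hm : m = i
        · subst hm
          rw [s3 m, if_pos rfl, ih3 m, if_neg (by omega), if_pos (by omega)]
          simp [Lc]
        · rw [s3 m, if_neg hm, ih3 m]
          by_cases h2 : m < i
          · rw [if_pos h2, if_pos (by omega)]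
          · rw [if_neg h2, if_neg (by omega)]

theorem solution_eq_sum (tl : List Int) :
    solution tl = ∑ i ∈ Finset.range tl.length, ∑ j ∈ Finset.range i, eP tl j i * Lc tl j := by
  exact (outerA_spec tl tl.length le_rfl).1

theorem foldl_count_range (q : Nat → Prop) [DecidablePred q] (m : Nat) (c0 : Int) :
    (List.range m).foldl (fun c i => if q i then c + 1 else c) c0
    = c0 + ∑ i ∈ Finset.range m, (if q i then (1 : Int) else 0) := by
  induction m with
  | zero => simp
  | succ m ih =>
      simp only [List.range_succ, List.foldl_append, List.foldl_cons, List.foldl_nil, ih,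
        Finset.sum_range_succ]
      split_ifs <;> ring

theorem foldl_count_range' (q : Nat → Prop) [DecidablePred q] :
    ∀ (m s : Nat) (c0 : Int),
    (List.range' s m).foldl (fun c k => if q k then c + 1 else c) c0
    = c0 + ∑ k ∈ Finset.Ico s (s + m), (if q k then (1 : Int) else 0) := by
  intro m
  induction m with
  | zero => simp
  | succ m ih =>
      intro s c0
      rw [List.range'_succ, List.foldl_cons, ih (s + 1)]
      rw [Finset.sum_eq_sum_Ico_succ_bot (by omega : s < s + (m + 1))]
      have h : s + 1 + m = s + (m + 1) := by omega
      rw [h]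
      split_ifs <;> ring

theorem b_left (tl : List Int) (j : Nat) :
    (List.range j).foldl (fun c i =>
      if PySem.Int.mod (tl.getD j 0) (tl.getD i 0) = 0 then c + 1 else c) (0 : Int) = Lc tl j := by
  rw [foldl_count_range (fun i => PySem.Int.mod (tl.getD j 0) (tl.getD i 0) = 0)]
  simp [Lc, eP]

theorem b_right (tl : List Int) (j : Nat) :
    (List.range' (j + 1) (tl.length - (j + 1))).foldl (fun c k =>
      if PySem.Int.mod (tl.getD k 0) (tl.getD j 0) = 0 then c + 1 else c) (0 : Int) = Rc tl j := by
  rw [foldl_count_range' (fun k => PySem.Int.mod (tl.getD k 0) (tl.getD j 0) = 0)]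
  unfold Rc
  by_cases h : j + 1 ≤ tl.length
  · have h2 : j + 1 + (tl.length - (j + 1)) = tl.length := by omega
    rw [h2]; simp [eP]
  · have h2 : tl.length - (j + 1) = 0 := by omega
    rw [h2]
    rw [Finset.Ico_eq_empty (by omega)]
    simp [Finset.Ico_eq_empty (by omega : ¬ j + 1 < tl.length)]

theorem foldl_add_range (g : Nat → Int) (m : Nat) (c0 : Int) :
    (List.range m).foldl (fun t j => t + g j) c0 = c0 + ∑ j ∈ Finset.range m, g j := by
  induction m with
  | zero => simp
  | succ m ih =>
      simp only [List.range_succ, List.foldl_append, List.foldl_cons, List.foldl_nil, ih,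
        Finset.sum_range_succ]
      ring

theorem solution_alt_eq_sum (tl : List Int) :
    solution_alt tl = ∑ j ∈ Finset.range tl.length, Lc tl j * Rc tl j := by
  unfold solution_alt
  rw [foldl_add_range (fun j =>
      ((List.range j).foldl (fun c i =>
        if PySem.Int.mod (tl.getD j 0) (tl.getD i 0) = 0 then c + 1 else c) 0) *
      ((List.range' (j + 1) (tl.length - (j + 1))).foldl (fun c k =>
        if PySem.Int.mod (tl.getD k 0) (tl.getD j 0) = 0 then c + 1 else c) 0))]
  rw [zero_add]
  refine Finset.sum_congr rfl ?_
  intro j _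
  rw [b_left, b_right]

theorem sum_swap_eq (tl : List Int) :
    ∑ i ∈ Finset.range tl.length, ∑ j ∈ Finset.range i, eP tl j i * Lc tl j
    = ∑ j ∈ Finset.range tl.length, Lc tl j * Rc tl j := by
  have filt : ∀ i : Nat, i ≤ tl.length →
      (Finset.range tl.length).filter (fun j => j < i) = Finset.range i := by
    intro i hi; ext x; simp; omega
  have filt2 : ∀ j : Nat,
      (Finset.range tl.length).filter (fun i => j < i) = Finset.Ico (j + 1) tl.length := by
    intro j; ext x; simp; omega
  calc ∑ i ∈ Finset.range tl.length, ∑ j ∈ Finset.range i, eP tl j i * Lc tl j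
      = ∑ i ∈ Finset.range tl.length, ∑ j ∈ Finset.range tl.length,
          if j < i then eP tl j i * Lc tl j else 0 := by
        refine Finset.sum_congr rfl ?_
        intro i hi
        rw [← Finset.sum_filter, filt i (le_of_lt (Finset.mem_range.mp hi))]
    _ = ∑ j ∈ Finset.range tl.length, ∑ i ∈ Finset.range tl.length,
          if j < i then eP tl j i * Lc tl j else 0 := Finset.sum_comm
    _ = ∑ j ∈ Finset.range tl.length, Lc tl j * Rc tl j := by
        refine Finset.sum_congr rfl ?_
        intro j _
        rw [← Finset.sum_filter, filt2 j]
        unfold Rc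
        rw [Finset.mul_sum]
        refine Finset.sum_congr rfl ?_
        intro k _
        ring

-- ===== VERDICT (by name: the statement is the Claim_ definition above) =====
theorem solution_spec : Claim_equal_solution := by
  intro tl _ _
  unfold Spec_solution
  rw [solution_eq_sum, solution_alt_eq_sum, sum_swap_eq]
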